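-- pv_equiv track=rewrite | github.com/elishakahan/polymathjr-ramsey | r-five-five/G2H#3.py | excludedJ4
-- ===== SOURCE A (Python) =====
-- def excludedJ4(excludedJ3, e3): # Finds J4 that consist of the last vertex, two non-neighbors, and a neighbor
--     j4 = []
--     length = len(excludedJ3)
--     if length > 1: # Ensures there are enough of the excluded J3, which are subgraphs of excluded J4
--         for k in range(length - 1):
--             for l in range(k + 1, length): # Iterates through all pairs of the excluded J3
--                 first, second = excludedJ3[k], excludedJ3[l]
--                 combo = 1 | (first ^ second)
--                 if bin(combo).count('1') == 3 and combo in e3: # Ensures that the two excluded J3 form an excluded J4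
--                     j4.append(first | second)
--     return j4
-- ===== SOURCE B (Python) =====
-- def excludedJ4(excludedJ3, e3):
--     # Distinct three-bit odd masks from e3: only these can ever equal 1 | (first ^ second).
--     masks = []
--     for c in e3:
--         if c & 1 == 1 and bin(c).count('1') == 3 and c not in masks:
--             masks.append(c)
--     # Positions of every value of excludedJ3 (increasing index order).
--     pos = {}
--     for i, v in enumerate(excludedJ3):
--         pos[v] = pos.get(v, []) + [i]
--     j4 = []
--     for k, first in enumerate(excludedJ3):
--         # For each candidate mask the partner is forced: second = first ^ c or first ^ (c ^ 1).
--         ls = []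
--         for c in masks:
--             for s in (first ^ c, first ^ (c ^ 1)):
--                 for l in pos.get(s, []):
--                     if l > k:
--                         ls.append(l)
--         ls.sort()
--         for l in ls:
--             j4.append(first | excludedJ3[l])
--     return j4
-- ===== Notes on version B (the rewrite author's own statement) =====
-- stated objective: faster
-- what changed: Instead of testing all O(n^2) pairs of excludedJ3, B precomputes the distinct odd three-bit masks of e3 and an index-position dictionary for excludedJ3, then for each vertex derives the only two possible xor-partners per mask and looks their positions up, sorting the per-vertex hits by index to reproduce A's pair order exactly.
import Mathlib
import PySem

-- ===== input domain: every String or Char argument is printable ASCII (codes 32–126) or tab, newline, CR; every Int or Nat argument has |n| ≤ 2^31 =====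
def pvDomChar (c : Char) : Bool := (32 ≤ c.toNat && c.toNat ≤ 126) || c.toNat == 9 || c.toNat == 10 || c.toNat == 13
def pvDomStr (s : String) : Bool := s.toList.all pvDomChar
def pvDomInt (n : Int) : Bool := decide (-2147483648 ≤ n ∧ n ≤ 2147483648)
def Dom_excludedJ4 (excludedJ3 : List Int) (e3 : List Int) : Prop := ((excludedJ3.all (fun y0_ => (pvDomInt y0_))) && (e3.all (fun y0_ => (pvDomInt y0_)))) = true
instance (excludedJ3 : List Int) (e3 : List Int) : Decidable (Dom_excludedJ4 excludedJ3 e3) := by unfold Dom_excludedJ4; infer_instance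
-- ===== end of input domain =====

-- B replaces A's scan over all pairs of excludedJ3: per vertex it derives the only two possible
-- partners from each distinct odd three-bit mask of e3 and looks their positions up in a
-- precomputed index, emitting hits in ascending index order (objective: faster).

-- ===== PORT A =====
-- 'bin(combo).count("1")' is the popcount idiom; PySem.Int.bitCount is exact for it (it counts
-- the '1' digits of bin(n), i.e. of |n|).
def excludedJ4 (excludedJ3 : List Int) (e3 : List Int) : List Int :=
  let j4 : List Int := []
  let length : Int := PySem.List.len excludedJ3
  if length > 1 then
    (PySem.List.pyRange 0 (length - 1)).foldl (fun j4 k =>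
      (PySem.List.pyRange (k + 1) length).foldl (fun j4 l =>
        let first := PySem.List.pyGetD excludedJ3 k 0
        let second := PySem.List.pyGetD excludedJ3 l 0
        let combo := PySem.Int.bor 1 (PySem.Int.bxor first second)
        if PySem.Int.bitCount combo == 3 && e3.contains combo then
          j4 ++ [PySem.Int.bor first second]
        else j4) j4) j4
  else j4

-- ===== PORT B =====
-- the 'masks' loop of Source B: distinct odd three-bit elements of e3
def altMasks (e3 : List Int) : List Int :=
  e3.foldl (fun ms c =>
    if (PySem.Int.band c 1 == 1 && PySem.Int.bitCount c == 3) && !(ms.contains c)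
    then ms ++ [c] else ms) []

-- the 'pos' loop of Source B: value -> list of its indices in excludedJ3
def altPos (excludedJ3 : List Int) : PySem.Dict Int (List Int) :=
  (PySem.List.enumerate excludedJ3).foldl
    (fun d p => d.insert p.2 (d.getD p.2 [] ++ [p.1])) PySem.Dict.empty

def excludedJ4_alt (excludedJ3 : List Int) (e3 : List Int) : List Int :=
  let masks := altMasks e3
  let pos := altPos excludedJ3
  (PySem.List.enumerate excludedJ3).foldl (fun j4 p =>
    let k := p.1
    let first := p.2
    let ls := masks.foldl (fun ls c =>
      [PySem.Int.bxor first c, PySem.Int.bxor first (PySem.Int.bxor c 1)].foldl (fun ls s =>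
        (pos.getD s []).foldl (fun ls l => if l > k then ls ++ [l] else ls) ls) ls) []
    (PySem.List.sorted ls id).foldl (fun j4 l =>
      j4 ++ [PySem.Int.bor first (PySem.List.pyGetD excludedJ3 l 0)]) j4) []

-- ===== PRECONDITION & SPEC =====
def Spec_excludedJ4 (excludedJ3 : List Int) (e3 : List Int) (out : List Int) : Prop := out = excludedJ4_alt excludedJ3 e3
instance (excludedJ3 : List Int) (e3 : List Int) (out : List Int) : Decidable (Spec_excludedJ4 excludedJ3 e3 out) := by unfold Spec_excludedJ4; infer_instance

-- ===== CLAIM (what is proved, stated in full; the proofs are below) =====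
def Claim_equal_excludedJ4 : Prop := ∀ (excludedJ3 : List Int) (e3 : List Int), Dom_excludedJ4 excludedJ3 e3 → Spec_excludedJ4 excludedJ3 e3 (excludedJ4 excludedJ3 e3)

-- ===== LEMMAS AND PROOFS =====

-- abbreviations used only by the proofs
def pvG (xs : List Int) (i : Int) : Int := PySem.List.pyGetD xs i 0

def pvP (e3 : List Int) (a b : Int) : Bool :=
  PySem.Int.bitCount (PySem.Int.bor 1 (PySem.Int.bxor a b)) == 3
    && e3.contains (PySem.Int.bor 1 (PySem.Int.bxor a b))

-- the list A's inner loop (over l) contributes for a fixed k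
def pvC (xs e3 : List Int) (k : Int) : List Int :=
  ((PySem.List.pyRange (k + 1) (PySem.List.len xs)).filter (fun l => pvP e3 (pvG xs k) (pvG xs l))).map
    (fun l => PySem.Int.bor (pvG xs k) (pvG xs l))

-- ---- Nat-level bit facts ----
theorem pvNat_or_one_of_odd (m : Nat) (h : m % 2 = 1) : 1 ||| m = m := by
  apply Nat.eq_of_testBit_eq
  intro i
  rw [Nat.testBit_or]
  cases i with
  | zero => simp [Nat.testBit_zero, h]
  | succ i => simp [Nat.testBit_succ]

theorem pvNat_or_one_of_even (m : Nat) (h : m % 2 = 0) : 1 ||| m = m ^^^ 1 := by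
  apply Nat.eq_of_testBit_eq
  intro i
  rw [Nat.testBit_or, Nat.testBit_xor]
  cases i with
  | zero => simp [Nat.testBit_zero, h]
  | succ i => simp [Nat.testBit_succ]

theorem pvNat_xor_one_of_odd (m : Nat) (h : m % 2 = 1) : m ^^^ 1 = m - 1 := by
  apply Nat.eq_of_testBit_eq
  intro i
  cases i with
  | zero =>
    rw [Nat.testBit_xor]
    simp [Nat.testBit_zero, h]
    omega
  | succ i =>
    rw [Nat.testBit_xor, Nat.testBit_succ, Nat.testBit_succ, Nat.testBit_succ]
    have : (m - 1) / 2 = m / 2 := by omega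
    simp [this]

theorem pvNat_or_one_mod_two (m : Nat) : (1 ||| m) % 2 = 1 := by
  rw [← Nat.and_one_is_mod, Nat.and_or_distrib_right, Nat.and_one_is_mod, Nat.and_one_is_mod]
  rcases Nat.mod_two_eq_zero_or_one m with h | h <;> simp [h]

theorem pvNat_xor_one_mod_two (m : Nat) : (m ^^^ 1) % 2 = 1 - m % 2 := by
  rw [← Nat.and_one_is_mod, Nat.and_xor_distrib_right, Nat.and_one_is_mod, Nat.and_one_is_mod]
  rcases Nat.mod_two_eq_zero_or_one m with h | h <;> simp [h]

-- ---- Int-level facts about PySem's Python-exact bitwise operations ----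
theorem pvParity (x : Int) : PySem.Int.mod x 2 = 0 ∨ PySem.Int.mod x 2 = 1 := by
  have h1 := PySem.Int.mod_nonneg x (b := 2) (by omega)
  have h2 := PySem.Int.mod_lt x (b := 2) (by omega)
  omega

theorem pvBxor_cancel (a b : Int) : PySem.Int.bxor a (PySem.Int.bxor a b) = b := by
  have hx : ∀ (n : Nat), ¬ (1:Int) ≤ -↑n := by intro n; omega
  by_cases ha : 0 ≤ a <;> by_cases hb : 0 ≤ b <;>
    simp [PySem.Int.bxor, ha, hb]
  · rw [if_neg (hx _)]; omega
  · intro h; exact absurd h (hx _)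
  · omega

theorem pvBxor_comm_one (c : Int) : PySem.Int.bxor (PySem.Int.bxor c 1) 1 = c := by
  rw [PySem.Int.bxor_comm, PySem.Int.bxor_comm c 1]
  exact pvBxor_cancel 1 c

theorem pvBor_one_of_odd (x : Int) (h : PySem.Int.mod x 2 = 1) : PySem.Int.bor 1 x = x := by
  rw [PySem.Int.mod_eq_emod_of_pos (by omega)] at h
  by_cases hx : 0 ≤ x <;> simp [PySem.Int.bor, hx]
  · rw [pvNat_or_one_of_odd _ (by omega)]; omega
  · omega

theorem pvBor_one_of_even (x : Int) (h : PySem.Int.mod x 2 = 0) :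
    PySem.Int.bor 1 x = PySem.Int.bxor x 1 := by
  rw [PySem.Int.mod_eq_emod_of_pos (by omega)] at h
  by_cases hx : 0 ≤ x <;> simp [PySem.Int.bor, PySem.Int.bxor, hx]
  · rw [pvNat_or_one_of_even _ (by omega)]
  · rw [pvNat_xor_one_of_odd _ (by omega)]
    omega

theorem pvBor_one_odd (x : Int) : PySem.Int.mod (PySem.Int.bor 1 x) 2 = 1 := by
  rw [PySem.Int.mod_eq_emod_of_pos (by omega)]
  by_cases hx : 0 ≤ x <;> simp [PySem.Int.bor, hx]
  · have := pvNat_or_one_mod_two x.toNat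
    omega
  · omega

theorem pvBxor_one_parity (x : Int) :
    PySem.Int.mod (PySem.Int.bxor x 1) 2 = 1 - PySem.Int.mod x 2 := by
  rw [PySem.Int.mod_eq_emod_of_pos (by omega), PySem.Int.mod_eq_emod_of_pos (by omega)]
  by_cases hx : 0 ≤ x <;> simp [PySem.Int.bxor, hx]
  · have := pvNat_xor_one_mod_two x.toNat
    omega
  · have := pvNat_xor_one_mod_two ((-x).toNat - 1)
    omega

theorem pvBxor_left_cancel {a c d : Int} (h : PySem.Int.bxor a c = PySem.Int.bxor a d) : c = d := by
  have h2 := congrArg (PySem.Int.bxor a) h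
  rwa [pvBxor_cancel, pvBxor_cancel] at h2

-- an odd mask never collides with an odd mask's even variant, whatever it is xor-ed onto
theorem pvVariants_ne {a c c' : Int} (hc : PySem.Int.mod c 2 = 1) (hc' : PySem.Int.mod c' 2 = 1) :
    PySem.Int.bxor a c ≠ PySem.Int.bxor a (PySem.Int.bxor c' 1) := by
  intro h
  have h2 := pvBxor_left_cancel h
  have h3 := pvBxor_one_parity c'
  rw [← h2] at h3
  omega

-- ---- masks: the foldl of B builds exactly the distinct odd three-bit elements of e3 ----
theorem pvMasks_aux (l : List Int) : ∀ init : List Int, init.Nodup →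
    (l.foldl (fun ms c =>
      if (PySem.Int.band c 1 == 1 && PySem.Int.bitCount c == 3) && !(ms.contains c)
      then ms ++ [c] else ms) init).Nodup ∧
    ∀ c, c ∈ l.foldl (fun ms c =>
      if (PySem.Int.band c 1 == 1 && PySem.Int.bitCount c == 3) && !(ms.contains c)
      then ms ++ [c] else ms) init ↔
        c ∈ init ∨ (c ∈ l ∧ PySem.Int.band c 1 = 1 ∧ PySem.Int.bitCount c = 3) := by
  induction l with
  | nil => intro init h; simpa using h
  | cons a t ih =>
    intro init hinit
    simp only [List.foldl_cons]
    by_cases hc : PySem.Int.band a 1 = 1 ∧ PySem.Int.bitCount a = 3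
    · by_cases hm : a ∈ init
      · rw [if_neg (by simp [hc.1, hc.2, hm])]
        obtain ⟨h1, h2⟩ := ih init hinit
        refine ⟨h1, fun c => ?_⟩
        rw [h2 c]
        constructor
        · rintro (h | h)
          · exact Or.inl h
          · exact Or.inr ⟨List.mem_cons_of_mem _ h.1, h.2⟩
        · rintro (h | ⟨h, h3⟩)
          · exact Or.inl h
          · rcases List.mem_cons.mp h with rfl | h
            · exact Or.inl hm
            · exact Or.inr ⟨h, h3⟩
      · rw [if_pos (by simp [hc.1, hc.2, hm])]
        obtain ⟨h1, h2⟩ := ih (init ++ [a])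
          (by simp [List.nodup_append, hinit]; exact fun a1 h1 h2 => hm (h2 ▸ h1))
        refine ⟨h1, fun c => ?_⟩
        rw [h2 c]
        simp only [List.mem_append, List.mem_cons, List.not_mem_nil, or_false]
        constructor
        · rintro ((h | rfl) | h)
          · exact Or.inl h
          · exact Or.inr ⟨Or.inl rfl, hc⟩
          · exact Or.inr ⟨Or.inr h.1, h.2⟩
        · rintro (h | ⟨rfl | h, h3⟩)
          · exact Or.inl (Or.inl h)
          · exact Or.inl (Or.inr rfl)
          · exact Or.inr ⟨h, h3⟩
    · rw [if_neg (by
        simp only [Bool.and_eq_true, beq_iff_eq, Bool.not_eq_true']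
        rintro ⟨⟨h1, h2⟩, -⟩
        exact hc ⟨h1, h2⟩)]
      obtain ⟨h1, h2⟩ := ih init hinit
      refine ⟨h1, fun c => ?_⟩
      rw [h2 c]
      constructor
      · rintro (h | h)
        · exact Or.inl h
        · exact Or.inr ⟨List.mem_cons_of_mem _ h.1, h.2⟩
      · rintro (h | ⟨h, h3⟩)
        · exact Or.inl h
        · rcases List.mem_cons.mp h with rfl | h
          · exact absurd h3 hc
          · exact Or.inr ⟨h, h3⟩

theorem pvMasks_inv (e3 : List Int) :
    (altMasks e3).Nodup ∧
      ∀ c, c ∈ altMasks e3 ↔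
        c ∈ e3 ∧ PySem.Int.band c 1 = 1 ∧ PySem.Int.bitCount c = 3 := by
  obtain ⟨h1, h2⟩ := pvMasks_aux e3 [] List.nodup_nil
  exact ⟨h1, fun c => by rw [altMasks, h2 c]; simp⟩

-- ---- pos: the dict maps every value to the ascending list of its indices ----
theorem pvPos_aux (xs : List Int) (m : Nat) :
    ∀ s, (((PySem.List.pyRange 0 (m : Int)).map (fun j => ((j : Int), pvG xs j))).foldl
        (fun d p => d.insert p.2 (d.getD p.2 [] ++ [p.1])) PySem.Dict.empty).getD s []
      = (PySem.List.pyRange 0 (m : Int)).filter (fun i => pvG xs i == s) := by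
  induction m with
  | zero =>
    intro s
    rw [PySem.List.pyRange_one_eq_nil (by omega)]
    simp [PySem.Dict.empty, PySem.Dict.getD, PySem.Dict.get?]
  | succ m ih =>
    intro s
    have hcast : ((m + 1 : Nat) : Int) = (m : Int) + 1 := by push_cast; ring
    rw [hcast, PySem.List.pyRange_one_succ_right (by positivity)]
    rw [List.map_append, List.foldl_append, List.filter_append]
    simp only [List.map_cons, List.map_nil, List.foldl_cons, List.foldl_nil, List.filter_cons,
      List.filter_nil]
    rw [PySem.Dict.getD_insert]
    by_cases hs : pvG xs m = s
    · rw [if_pos (by exact hs.symm), ih, hs]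
      simp
    · rw [if_neg (fun h => hs h.symm), ih s]
      simp [hs]

theorem pvPos_getD (xs : List Int) (s : Int) :
    (altPos xs).getD s [] =
      (PySem.List.pyRange 0 (PySem.List.len xs)).filter (fun i => pvG xs i == s) := by
  rw [altPos, PySem.List.enumerate_eq_map_pyRange xs 0]
  have h := pvPos_aux xs xs.length s
  simpa [PySem.List.len_eq] using h

-- ---- the key bitmask equivalence between A's pair test and B's partner derivation ----
theorem pvKey_iff (e3 : List Int) (a b : Int) :
    pvP e3 a b = true ↔
      ∃ c ∈ altMasks e3,
        b = PySem.Int.bxor a c ∨ b = PySem.Int.bxor a (PySem.Int.bxor c 1) := by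
  rw [pvP]
  simp only [Bool.and_eq_true, beq_iff_eq, List.contains_iff_mem]
  constructor
  · rintro ⟨hbc, hmem⟩
    set x := PySem.Int.bxor a b with hx
    refine ⟨PySem.Int.bor 1 x, (pvMasks_inv e3).2 _ |>.mpr
      ⟨hmem, by rw [PySem.Int.band_one]; exact pvBor_one_odd x, hbc⟩, ?_⟩
    rcases pvParity x with hp | hp
    · right
      rw [pvBor_one_of_even x hp, pvBxor_comm_one, hx, pvBxor_cancel]
    · left
      rw [pvBor_one_of_odd x hp, hx, pvBxor_cancel]
  · rintro ⟨c, hc, rfl | rfl⟩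
    · obtain ⟨hce, hodd, hbc⟩ := (pvMasks_inv e3).2 c |>.mp hc
      rw [PySem.Int.band_one] at hodd
      rw [pvBxor_cancel, pvBor_one_of_odd c hodd]
      exact ⟨hbc, hce⟩
    · obtain ⟨hce, hodd, hbc⟩ := (pvMasks_inv e3).2 c |>.mp hc
      rw [PySem.Int.band_one] at hodd
      have heven : PySem.Int.mod (PySem.Int.bxor c 1) 2 = 0 := by
        rw [pvBxor_one_parity, hodd]; ring
      rw [pvBxor_cancel, pvBor_one_of_even _ heven, pvBxor_comm_one]
      exact ⟨hbc, hce⟩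

-- ---- per-vertex agreement: B's sorted hit list is exactly A's inner filtered range ----
theorem pvSorted_ls (xs e3 : List Int) (k : Int) (hk : 0 ≤ k) :
    PySem.List.sorted
      ((altMasks e3).foldl (fun ls c =>
        [PySem.Int.bxor (pvG xs k) c,
         PySem.Int.bxor (pvG xs k) (PySem.Int.bxor c 1)].foldl (fun ls s =>
          ((altPos xs).getD s []).foldl (fun ls l => if l > k then ls ++ [l] else ls) ls) ls) []) id
      = (PySem.List.pyRange (k + 1) (PySem.List.len xs)).filter
          (fun l => pvP e3 (pvG xs k) (pvG xs l)) := by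
  set a := pvG xs k with ha
  set n := PySem.List.len xs with hn
  have hinner : ∀ (init lst : List Int),
      lst.foldl (fun ls l => if l > k then ls ++ [l] else ls) init
        = init ++ lst.filter (fun l => decide (l > k)) := by
    intro init lst
    have h := PySem.List.foldl_append_if (fun l : Int => decide (l > k)) id lst init
    simpa [decide_eq_true_eq] using h
  have hshape :
      ((altMasks e3).foldl (fun ls c =>
        [PySem.Int.bxor a c, PySem.Int.bxor a (PySem.Int.bxor c 1)].foldl (fun ls s =>
          ((altPos xs).getD s []).foldl (fun ls l => if l > k then ls ++ [l] else ls) ls) ls) [])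
      = (altMasks e3).flatMap (fun c =>
          (((altPos xs).getD (PySem.Int.bxor a c) []).filter (fun l => decide (l > k)))
            ++ (((altPos xs).getD (PySem.Int.bxor a (PySem.Int.bxor c 1)) []).filter
                  (fun l => decide (l > k)))) := by
    have hmid : (fun (ls : List Int) (c : Int) =>
        [PySem.Int.bxor a c, PySem.Int.bxor a (PySem.Int.bxor c 1)].foldl (fun ls s =>
          ((altPos xs).getD s []).foldl (fun ls l => if l > k then ls ++ [l] else ls) ls) ls)
      = (fun ls c => ls ++
          ((((altPos xs).getD (PySem.Int.bxor a c) []).filter (fun l => decide (l > k)))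
            ++ (((altPos xs).getD (PySem.Int.bxor a (PySem.Int.bxor c 1)) []).filter
                  (fun l => decide (l > k))))) := by
      funext ls c
      simp only [List.foldl_cons, List.foldl_nil, hinner, List.append_assoc]
    rw [hmid, PySem.List.foldl_append_eq_flatMap]
    simp
  rw [hshape]
  have hpiece : ∀ (s l : Int),
      (l ∈ ((altPos xs).getD s []).filter (fun l => decide (l > k)))
        ↔ (0 ≤ l ∧ l < n ∧ pvG xs l = s ∧ k < l) := by
    intro s l
    rw [pvPos_getD]
    simp only [List.mem_filter, PySem.List.mem_pyRange_one, decide_eq_true_eq, beq_iff_eq, ← hn]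
    tauto
  have hpnodup : ∀ s : Int, (((altPos xs).getD s []).filter (fun l => decide (l > k))).Nodup := by
    intro s
    rw [pvPos_getD]
    exact ((PySem.List.nodup_pyRange_one _ _).filter _).filter _
  apply PySem.List.sorted_eq_of_perm_of_pairwise_lt
  · rw [List.perm_ext_iff_of_nodup ((PySem.List.nodup_pyRange_one _ _).filter _) ?nodup]
    case nodup =>
      rw [List.nodup_flatMap]
      constructor
      · intro c hc
        obtain ⟨-, hodd, -⟩ := (pvMasks_inv e3).2 c |>.mp hc
        rw [PySem.Int.band_one] at hodd
        rw [List.nodup_append]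
        refine ⟨hpnodup _, hpnodup _, ?_⟩
        intro p hp q hq rfl
        obtain ⟨-, -, hg1, -⟩ := (hpiece _ _).mp hp
        obtain ⟨-, -, hg2, -⟩ := (hpiece _ _).mp hq
        exact pvVariants_ne hodd hodd (hg1 ▸ hg2)
      · have hnd : List.Pairwise (· ≠ ·) (altMasks e3) := (pvMasks_inv e3).1
        refine List.Pairwise.imp_of_mem ?_ hnd
        intro c c' hc hc' hne
        obtain ⟨-, hodd, -⟩ := (pvMasks_inv e3).2 c |>.mp hc
        obtain ⟨-, hodd', -⟩ := (pvMasks_inv e3).2 c' |>.mp hc'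
        rw [PySem.Int.band_one] at hodd hodd'
        show List.Disjoint _ _
        rw [List.disjoint_left]
        intro l hl hl'
        rw [List.mem_append, hpiece, hpiece] at hl hl'
        rcases hl with ⟨-, -, h1, -⟩ | ⟨-, -, h1, -⟩ <;>
          rcases hl' with ⟨-, -, h2, -⟩ | ⟨-, -, h2, -⟩
        · exact hne (pvBxor_left_cancel (h1 ▸ h2))
        · exact pvVariants_ne hodd hodd' (h1 ▸ h2)
        · exact pvVariants_ne hodd' hodd (h2 ▸ h1)
        · have h3 : PySem.Int.bxor c 1 = PySem.Int.bxor c' 1 := pvBxor_left_cancel (h1 ▸ h2)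
          exact hne (by rw [← pvBxor_comm_one c, h3, pvBxor_comm_one])
    · intro l
      simp only [List.mem_filter, PySem.List.mem_pyRange_one, List.mem_flatMap, List.mem_append,
        hpiece]
      constructor
      · rintro ⟨⟨h1, h2⟩, hp⟩
        obtain ⟨c, hc, hcase⟩ := (pvKey_iff e3 a _).mp hp
        exact ⟨c, hc, hcase.elim (fun h => Or.inl ⟨by omega, h2, h, by omega⟩)
          (fun h => Or.inr ⟨by omega, h2, h, by omega⟩)⟩
      · rintro ⟨c, hc, h | h⟩ <;> obtain ⟨h0, h1, h2, h3⟩ := h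
        · exact ⟨⟨by omega, h1⟩, (pvKey_iff e3 a _).mpr ⟨c, hc, Or.inl h2⟩⟩
        · exact ⟨⟨by omega, h1⟩, (pvKey_iff e3 a _).mpr ⟨c, hc, Or.inr h2⟩⟩
  · exact (PySem.List.pairwise_lt_pyRange_one _ _).filter _

-- ---- both programs equal the same flatMap over all vertices ----
theorem pvC_last (xs e3 : List Int) : pvC xs e3 ((xs.length : Int) - 1) = [] := by
  rw [pvC, PySem.List.pyRange_one_eq_nil (by simp)]
  simp

theorem pvA_eq (xs e3 : List Int) :
    excludedJ4 xs e3 = (PySem.List.pyRange 0 (PySem.List.len xs)).flatMap (pvC xs e3) := by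
  simp only [excludedJ4]
  by_cases h : PySem.List.len xs > 1
  · rw [if_pos h]
    have hfn : (fun (j4 : List Int) (k : Int) =>
        (PySem.List.pyRange (k + 1) (PySem.List.len xs)).foldl (fun j4 l =>
          if PySem.Int.bitCount (PySem.Int.bor 1 (PySem.Int.bxor (PySem.List.pyGetD xs k 0) (PySem.List.pyGetD xs l 0))) == 3
              && e3.contains (PySem.Int.bor 1 (PySem.Int.bxor (PySem.List.pyGetD xs k 0) (PySem.List.pyGetD xs l 0))) then
            j4 ++ [PySem.Int.bor (PySem.List.pyGetD xs k 0) (PySem.List.pyGetD xs l 0)]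
          else j4) j4)
      = (fun j4 k => j4 ++ pvC xs e3 k) := by
      funext j4 k
      exact PySem.List.foldl_append_if (fun l => pvP e3 (pvG xs k) (pvG xs l))
        (fun l => PySem.Int.bor (pvG xs k) (pvG xs l)) _ j4
    rw [hfn, PySem.List.foldl_append_eq_flatMap]
    rw [show PySem.List.pyRange 0 (PySem.List.len xs)
        = PySem.List.pyRange 0 (PySem.List.len xs - 1) ++ [PySem.List.len xs - 1] by
      have h2 := PySem.List.pyRange_one_succ_right (a := 0) (b := PySem.List.len xs - 1) (by omega)
      rw [show PySem.List.len xs - 1 + 1 = PySem.List.len xs by ring] at h2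
      exact h2]
    rw [List.flatMap_append]
    simp [pvC_last]
  · rw [if_neg h]
    simp only [PySem.List.len_eq] at h ⊢
    have h2 : xs.length = 0 ∨ xs.length = 1 := by omega
    rcases h2 with h2 | h2 <;> rw [h2]
    · rw [show ((0:Nat):Int) = 0 by norm_num, PySem.List.pyRange_one_eq_nil (by omega)]
      simp
    · rw [show ((1:Nat):Int) = 0 + 1 by norm_num, PySem.List.pyRange_one_succ_right (by omega),
        PySem.List.pyRange_one_eq_nil (by omega)]
      simp only [List.nil_append, List.flatMap_cons, List.flatMap_nil]
      rw [pvC, PySem.List.pyRange_one_eq_nil (by simp [h2])]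
      simp

theorem pvB_eq (xs e3 : List Int) :
    excludedJ4_alt xs e3 = (PySem.List.pyRange 0 (PySem.List.len xs)).flatMap (pvC xs e3) := by
  simp only [excludedJ4_alt]
  rw [PySem.List.enumerate_eq_map_pyRange xs 0, List.foldl_map]
  rw [PySem.List.foldl_congr_mem _ _ (fun j4 j => j4 ++ pvC xs e3 j) _ ?_]
  · rw [PySem.List.foldl_append_eq_flatMap]
    simp
  · intro acc j hj
    have hj0 : 0 ≤ j := ((PySem.List.mem_pyRange_one).mp hj).1
    dsimp only
    have hpv : ∀ (ys : List Int) (i : Int), PySem.List.pyGetD ys i 0 = pvG ys i := fun _ _ => rfl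
    simp only [hpv]
    rw [pvSorted_ls xs e3 j hj0]
    rw [PySem.List.foldl_append_singleton_eq_map (fun l => PySem.Int.bor (pvG xs j) (pvG xs l))]
    rfl

-- ===== VERDICT (by name: the statement is the Claim_ definition above) =====
theorem excludedJ4_spec : Claim_equal_excludedJ4 := by
  intro xs e3 _
  unfold Spec_excludedJ4
  rw [pvA_eq, pvB_eq]
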